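-- pv_equiv track=rewrite | github.com/Las02/ARGenesInRead | main.py | read_is_valid
-- ===== SOURCE A (Python) =====
-- def read_is_valid(gene, read):
--     '''
--     return True if the read is covering enough of the gene,
--     else returns False
--     '''
--     # Various parameters
--     max_space = 1   # The maximum space in the read covering the gene
--     side_bonus = int(0.7 * len(read))   # How much of the read can be outside the gene
--     threshold_score = int(0.9 *len(read))   #The percent of the read which needs to cover the gene
--
--     # Various init
--     maxcount = 0
--     count = 0
--     exitcount = 0
--     in_kmer = False
--     len_dna = len(gene)
--
--     # Score the reads coverage of the gene
--     for pos,value in enumerate(gene):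
--
--         # Start counting the coverage at first [1] in gene
--         if value == 1: in_kmer = True
--         if in_kmer:
--             if value == 0:
--                 exitcount += 1
--             else:
--                 count += 1
--                 # If at either side position, add a bonus to the score
--                 if pos in [0, len_dna-1]:
--                     count += side_bonus
--
--             # If a better fitting coverage of the read to the gene is found, use it
--             if count > maxcount:
--                 maxcount = count
--
--             # Stop counting the coverage if there is too much spacing
--             if exitcount >= max_space:
--                 count = 0
--                 exitcount = 0
--                 in_kmer = False
--
--     return maxcount >= threshold_score
-- ===== SOURCE B (Python) =====
-- def read_is_valid(gene, read):
--     '''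
--     return True if the read is covering enough of the gene,
--     else returns False
--     '''
--     side_bonus = int(0.7 * len(read))
--     threshold_score = int(0.9 * len(read))
--     n = len(gene)
--
--     best = 0
--     start = 0
--     while start < n:
--         if gene[start] != 1:
--             start += 1
--             continue
--         # segment: from this 1 up to (but not including) the next 0
--         end = start
--         while end < n and gene[end] != 0:
--             end += 1
--         # each boundary position of the gene covered by the segment earns the bonus
--         # ({...} deduplicates the two boundaries when the gene has length 1)
--         ends_covered = len({p for p in (0, n - 1) if start <= p < end})
--         score = (end - start) + side_bonus * ends_covered
--         best = max(best, score)
--         start = end + 1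
--     return best >= threshold_score
-- ===== Notes on version B (the rewrite author's own statement) =====
-- stated objective: simpler
-- what changed: A's single stateful scan with in_kmer/count/exitcount flags is replaced by a pointer loop that jumps from segment to segment (each maximal run of nonzero values starting at a 1) and scores each segment in closed form: its length plus the side bonus for each gene boundary position it covers.
import Mathlib
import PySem

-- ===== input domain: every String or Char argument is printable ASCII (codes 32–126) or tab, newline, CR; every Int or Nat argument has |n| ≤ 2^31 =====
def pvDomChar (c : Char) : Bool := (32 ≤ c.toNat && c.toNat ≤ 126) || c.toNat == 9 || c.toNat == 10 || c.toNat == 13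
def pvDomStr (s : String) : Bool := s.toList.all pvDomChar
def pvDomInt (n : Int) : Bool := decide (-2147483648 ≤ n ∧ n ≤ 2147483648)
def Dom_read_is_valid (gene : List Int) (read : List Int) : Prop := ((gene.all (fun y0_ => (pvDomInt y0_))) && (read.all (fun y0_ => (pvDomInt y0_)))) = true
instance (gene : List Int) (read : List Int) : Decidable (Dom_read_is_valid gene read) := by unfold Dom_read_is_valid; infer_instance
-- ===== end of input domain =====

-- B replaces A's single stateful scan (enumerate + in_kmer/count/exitcount flags) by a pointer
-- loop that extracts each maximal 1-started nonzero segment and scores it in closed form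
-- (objective: simpler). Return-value equivalence only; neither version mutates its arguments.

-- ===== PORT A =====
-- shared helper: exact value of Python's int(c * n) where c is the IEEE-754 double with
-- 53-bit significand m (value m / 2^53, e.g. 0.7 or 0.9) and n = len(...) : round the exact
-- product m*n to 53 significant bits (round-half-to-even), then truncate.  Exact for every n.
def pvFloatScale (m : Nat) (n : Nat) : Int :=
  let x := m * n
  if x = 0 then 0
  else
    let b := Nat.log2 x + 1
    if b ≤ 53 then ((x / 2 ^ 53 : Nat) : Int)
    else
      let k := b - 53
      let q := x / 2 ^ k
      let r := x % 2 ^ k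
      let h := 2 ^ (k - 1)
      let q' := if h < r ∨ (r = h ∧ q % 2 = 1) then q + 1 else q
      ((q' * 2 ^ k / 2 ^ 53 : Nat) : Int)

-- the body of A's for-loop, step for step (state = (maxcount, count, exitcount, in_kmer))
def pvStepA (side_bonus len_dna max_space : Int) (st : Int × Int × Int × Bool)
    (pv : Int × Int) : Int × Int × Int × Bool :=
  let maxcount := st.1
  let count := st.2.1
  let exitcount := st.2.2.1
  let in_kmer := st.2.2.2
  let pos := pv.1
  let value := pv.2
  let in_kmer := if value = 1 then true else in_kmer
  if in_kmer then
    let (count, exitcount) :=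
      if value = 0 then (count, exitcount + 1)
      else
        let c := count + 1
        (if pos = 0 ∨ pos = len_dna - 1 then c + side_bonus else c, exitcount)
    let maxcount := if maxcount < count then count else maxcount
    if max_space ≤ exitcount then (maxcount, 0, 0, false)
    else (maxcount, count, exitcount, in_kmer)
  else (maxcount, count, exitcount, in_kmer)

def read_is_valid (gene : List Int) (read : List Int) : Bool :=
  let max_space : Int := 1
  let side_bonus : Int := pvFloatScale 6305039478318694 read.length   -- int(0.7 * len(read))
  let threshold_score : Int := pvFloatScale 8106479329266893 read.length   -- int(0.9 * len(read))
  let len_dna : Int := gene.length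
  let final := (PySem.List.enumerate gene 0).foldl (pvStepA side_bonus len_dna max_space)
    (0, 0, 0, false)
  decide (threshold_score ≤ final.1)

-- ===== PORT B =====
-- inner while: first index ≥ e that is out of range or holds a 0
def pvSegEnd (gene : List Int) (e : Nat) : Nat :=
  if h : e < gene.length then
    if gene.getD e 0 ≠ 0 then pvSegEnd gene (e + 1) else e
  else e
termination_by gene.length - e

theorem pvSegEnd_ge (gene : List Int) (e : Nat) : e ≤ pvSegEnd gene e := by
  unfold pvSegEnd
  split
  · split
    · exact le_trans (Nat.le_succ e) (pvSegEnd_ge gene (e + 1))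
    · exact le_refl e
  · exact le_refl e
termination_by gene.length - e

-- outer while of Source B: start jumps to just past each scored segment
def pvBLoop (gene : List Int) (side_bonus : Int) (start : Nat) (best : Int) : Int :=
  if h : start < gene.length then
    if gene.getD start 0 ≠ 1 then pvBLoop gene side_bonus (start + 1) best
    else
      let e := pvSegEnd gene start
      let n : Int := gene.length
      let ends_covered : Int :=
        (PySem.Set.ofList (([0, n - 1] : List Int).filter
          (fun p => decide ((start : Int) ≤ p ∧ p < (e : Int))))).length
      let score : Int := ((e : Int) - (start : Int)) + side_bonus * ends_covered
      pvBLoop gene side_bonus (e + 1) (max best score)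
  else best
termination_by gene.length - start
decreasing_by
  · omega
  · have := pvSegEnd_ge gene start; omega

def read_is_valid_alt (gene : List Int) (read : List Int) : Bool :=
  let side_bonus : Int := pvFloatScale 6305039478318694 read.length   -- int(0.7 * len(read))
  let threshold_score : Int := pvFloatScale 8106479329266893 read.length   -- int(0.9 * len(read))
  decide (threshold_score ≤ pvBLoop gene side_bonus 0 0)

-- ===== PRECONDITION & SPEC =====
def Spec_read_is_valid (gene : List Int) (read : List Int) (out : Bool) : Prop := out = read_is_valid_alt gene read
instance (gene : List Int) (read : List Int) (out : Bool) : Decidable (Spec_read_is_valid gene read out) := by unfold Spec_read_is_valid; infer_instance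

-- ===== CLAIM (what is proved, stated in full; the proofs are below) =====
def Claim_equal_read_is_valid : Prop := ∀ (gene : List Int) (read : List Int), Dom_read_is_valid gene read → Spec_read_is_valid gene read (read_is_valid gene read)

-- ===== LEMMAS AND PROOFS =====

-- reference: maximal segment score, structural over the gene suffix, p = absolute position
def pvBonusAt (s n : Int) (p : Nat) : Int := if (p : Int) = 0 ∨ (p : Int) = n - 1 then s else 0

mutual
def pvRefIn (s n : Int) (p : Nat) (g : List Int) (c : Int) : Int :=
  match g with
  | [] => c
  | x :: t => if x = 0 then max c (pvRefOut s n (p + 1) t)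
              else pvRefIn s n (p + 1) t (c + 1 + pvBonusAt s n p)
def pvRefOut (s n : Int) (p : Nat) (g : List Int) : Int :=
  match g with
  | [] => 0
  | x :: t => if x = 1 then pvRefIn s n (p + 1) t (1 + pvBonusAt s n p)
              else pvRefOut s n (p + 1) t
end

theorem pvBonusAt_nonneg (s n : Int) (p : Nat) (hs : 0 ≤ s) : 0 ≤ pvBonusAt s n p := by
  unfold pvBonusAt; split <;> omega

theorem pvRefIn_ge (s n : Int) (hs : 0 ≤ s) (g : List Int) : ∀ (p : Nat) (c : Int),
    c ≤ pvRefIn s n p g c := by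
  induction g with
  | nil => intro p c; simp [pvRefIn]
  | cons x t ih =>
    intro p c
    simp only [pvRefIn]
    split
    · exact le_max_left _ _
    · have := pvBonusAt_nonneg s n p hs
      calc c ≤ c + 1 + pvBonusAt s n p := by omega
        _ ≤ _ := ih (p + 1) _

-- A's fold over the enumerated suffix computes the reference maximum
theorem pvFoldA (s n : Int) (hs : 0 ≤ s) (g : List Int) :
    ∀ (p : Nat) (mc c : Int) (ik : Bool), 0 ≤ mc → (ik = false → c = 0) → (ik = true → c ≤ mc) →
    ((PySem.List.enumerate g (p : Int)).foldl (pvStepA s n 1) (mc, c, 0, ik)).1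
      = max mc (if ik then pvRefIn s n p g c else pvRefOut s n p g) := by
  induction g with
  | nil =>
    intro p mc c ik hmc hfal htru
    cases ik <;> simp_all [PySem.List.enumerate, pvRefIn, pvRefOut]
  | cons x t ih =>
    intro p mc c ik hmc hfal htru
    rw [PySem.List.enumerate_cons, List.foldl_cons]
    have hcast : ((p : Int) + 1) = ((p + 1 : Nat) : Int) := by push_cast; ring
    by_cases hx0 : x = 0
    · subst hx0
      cases ik with
      | false =>
        -- value 0, not in kmer: state unchanged
        have hstep : pvStepA s n 1 (mc, c, 0, false) ((p : Int), 0) = (mc, c, 0, false) := by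
          simp [pvStepA]
        rw [hstep, hcast, ih (p + 1) mc c false hmc hfal htru]
        have hc0 : c = 0 := hfal rfl
        simp [pvRefOut]
      | true =>
        -- value 0, in kmer: maxcount picks up count, then reset
        have hstep : pvStepA s n 1 (mc, c, 0, true) ((p : Int), 0)
            = (if mc < c then c else mc, 0, 0, false) := by
          simp [pvStepA]
        have hcle : c ≤ mc := htru rfl
        rw [hstep, if_neg (by omega), hcast,
          ih (p + 1) mc 0 false hmc (fun _ => rfl) (fun h => by simp at h)]
        simp only [pvRefIn, Bool.false_eq_true, if_false, if_true]
        omega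
    · by_cases hx1 : x = 1
      · subst hx1
        -- value 1: in_kmer becomes/stays true, count bumps (+ bonus)
        have hb := pvBonusAt_nonneg s n p hs
        cases ik with
        | false =>
          have hc0 : c = 0 := hfal rfl
          subst hc0
          have hstep : pvStepA s n 1 (mc, 0, 0, false) ((p : Int), 1)
              = (max mc (0 + 1 + pvBonusAt s n p), 0 + 1 + pvBonusAt s n p, 0, true) := by
            simp [pvStepA, pvBonusAt]
            constructor
            · split_ifs <;> omega
            · split_ifs <;> omega
          rw [hstep, hcast, ih (p + 1) _ _ true (by omega) (fun h => by simp at h)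
            (fun _ => le_max_right _ _)]
          have hge := pvRefIn_ge s n hs t (p + 1) (0 + 1 + pvBonusAt s n p)
          simp only [pvRefOut, Bool.false_eq_true, if_false, if_true]
          have h01 : (0 : Int) + 1 + pvBonusAt s n p = 1 + pvBonusAt s n p := by ring
          rw [h01] at hge ⊢
          omega
        | true =>
          have hstep : pvStepA s n 1 (mc, c, 0, true) ((p : Int), 1)
              = (max mc (c + 1 + pvBonusAt s n p), c + 1 + pvBonusAt s n p, 0, true) := by
            simp [pvStepA, pvBonusAt]
            constructor
            · split_ifs <;> omega
            · split_ifs <;> omega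
          have hcle : c ≤ mc := htru rfl
          rw [hstep, hcast, ih (p + 1) _ _ true (by omega) (fun h => by simp at h)
            (fun _ => le_max_right _ _)]
          have hge := pvRefIn_ge s n hs t (p + 1) (c + 1 + pvBonusAt s n p)
          simp only [pvRefIn, if_neg (by omega : ¬(1 : Int) = 0), if_true]
          omega
      · -- value neither 0 nor 1
        cases ik with
        | false =>
          have hstep : pvStepA s n 1 (mc, c, 0, false) ((p : Int), x) = (mc, c, 0, false) := by
            simp [pvStepA, hx1]
          rw [hstep, hcast, ih (p + 1) mc c false hmc hfal htru]
          simp [pvRefOut, hx1]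
        | true =>
          have hstep : pvStepA s n 1 (mc, c, 0, true) ((p : Int), x)
              = (max mc (c + 1 + pvBonusAt s n p), c + 1 + pvBonusAt s n p, 0, true) := by
            simp [pvStepA, pvBonusAt, hx0, hx1]
            constructor
            · split_ifs <;> omega
            · split_ifs <;> omega
          have hcle : c ≤ mc := htru rfl
          have hb := pvBonusAt_nonneg s n p hs
          rw [hstep, hcast, ih (p + 1) _ _ true (by omega) (fun h => by simp at h)
            (fun _ => le_max_right _ _)]
          have hge := pvRefIn_ge s n hs t (p + 1) (c + 1 + pvBonusAt s n p)
          simp only [pvRefIn, if_neg hx0, if_true]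
          omega

-- pvSegEnd's specification
theorem pvSegEnd_le (gene : List Int) (e : Nat) (he : e ≤ gene.length) :
    pvSegEnd gene e ≤ gene.length := by
  unfold pvSegEnd
  split
  · split
    · exact pvSegEnd_le gene (e + 1) (by omega)
    · exact he
  · exact he
termination_by gene.length - e

theorem pvSegEnd_nonzero (gene : List Int) (e : Nat) : ∀ j, e ≤ j → j < pvSegEnd gene e →
    gene.getD j 0 ≠ 0 := by
  unfold pvSegEnd
  split
  · split
    · intro j hj hj'
      rcases Nat.eq_or_lt_of_le hj with h | h
      · subst h; assumption
      · exact pvSegEnd_nonzero gene (e + 1) j h hj'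
    · intro j hj hj'; omega
  · intro j hj hj'; omega
termination_by gene.length - e

theorem pvSegEnd_end (gene : List Int) (e : Nat) (he : e ≤ gene.length) :
    pvSegEnd gene e = gene.length ∨ gene.getD (pvSegEnd gene e) 0 = 0 := by
  unfold pvSegEnd
  split
  · split
    · exact pvSegEnd_end gene (e + 1) (by omega)
    · right; omega
  · left; omega
termination_by gene.length - e

-- run accumulator: what A's count becomes across a nonzero run
def pvAddRun (s n : Int) (p e : Nat) (c : Int) : Int :=
  if p < e then pvAddRun s n (p + 1) e (c + 1 + pvBonusAt s n p) else c
termination_by e - p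

theorem pvRefIn_run (s n : Int) (gene : List Int) (e : Nat)
    (he : e ≤ gene.length) (hend : e = gene.length ∨ gene.getD e 0 = 0) :
    ∀ (p : Nat) (c : Int), p ≤ e → (∀ j, p ≤ j → j < e → gene.getD j 0 ≠ 0) →
    pvRefIn s n p (gene.drop p) c =
      if e = gene.length then pvAddRun s n p e c
      else max (pvAddRun s n p e c) (pvRefOut s n (e + 1) (gene.drop (e + 1))) := by
  intro p
  induction hfu : e - p using Nat.strong_induction_on generalizing p with
  | _ fu ih =>
    intro c hpe hnz
    rcases Nat.eq_or_lt_of_le hpe with hq | hlt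
    · -- p = e : the run is over
      subst hq
      have har : pvAddRun s n p p c = c := by unfold pvAddRun; simp
      rcases hend with hlen | hzero
      · rw [if_pos hlen, har, hlen, List.drop_length]
        simp [pvRefIn]
      · by_cases hlen : p = gene.length
        · rw [if_pos hlen, har, hlen, List.drop_length]
          simp [pvRefIn]
        · have hplen : p < gene.length := by omega
          rw [if_neg hlen, List.drop_eq_getElem_cons hplen]
          have hx : gene[p] = 0 := by
            have := List.getD_eq_getElem gene 0 hplen
            omega
          rw [har]
          simp only [pvRefIn, hx, if_true]
    · -- p < e : gene[p] is a nonzero run element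
      have hplen : p < gene.length := by omega
      rw [List.drop_eq_getElem_cons hplen]
      have hx : gene[p] ≠ 0 := by
        have := List.getD_eq_getElem gene 0 hplen
        have := hnz p (le_refl p) hlt
        omega
      simp only [pvRefIn, if_neg hx]
      rw [ih (e - (p + 1)) (by omega) (p + 1) rfl (c + 1 + pvBonusAt s n p) (by omega)
        (fun j hj hj' => hnz j (by omega) hj')]
      have har : pvAddRun s n p e c = pvAddRun s n (p + 1) e (c + 1 + pvBonusAt s n p) := by
        conv_lhs => unfold pvAddRun
        rw [if_pos hlt]
      rw [har]

theorem pvAddRun_eq (s n : Int) (e : Nat) : ∀ (p : Nat) (c : Int), p ≤ e →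
    pvAddRun s n p e c = c + ((e : Int) - (p : Int))
      + s * ((if (p : Int) ≤ 0 ∧ (0 : Int) < (e : Int) then 1 else 0)
           + (if ¬(n - 1 = 0) ∧ (p : Int) ≤ n - 1 ∧ n - 1 < (e : Int) then 1 else 0)) := by
  intro p
  induction hfu : e - p using Nat.strong_induction_on generalizing p with
  | _ fu ih =>
    intro c hpe
    unfold pvAddRun
    split
    · rename_i hlt
      rw [ih (e - (p + 1)) (by omega) (p + 1) rfl _ (by omega)]
      unfold pvBonusAt
      split_ifs <;> push_cast at * <;> omega
    · split_ifs <;> push_cast at * <;> omega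

theorem pvEndsCovered (n : Int) (p e : Nat) :
    ((PySem.Set.ofList (([0, n - 1] : List Int).filter
        (fun q => decide ((p : Int) ≤ q ∧ q < (e : Int))))).length : Int)
      = (if (p : Int) ≤ 0 ∧ (0 : Int) < (e : Int) then 1 else 0)
      + (if ¬(n - 1 = 0) ∧ (p : Int) ≤ n - 1 ∧ n - 1 < (e : Int) then 1 else 0) := by
  have hf : (([0, n - 1] : List Int).filter (fun q => decide ((p : Int) ≤ q ∧ q < (e : Int))))
      = (if (p : Int) ≤ 0 ∧ (0 : Int) < (e : Int) then [0] else [])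
        ++ (if (p : Int) ≤ n - 1 ∧ n - 1 < (e : Int) then [n - 1] else []) := by
    by_cases h0 : (p : Int) ≤ 0 ∧ (0 : Int) < (e : Int) <;>
    by_cases h1 : (p : Int) ≤ n - 1 ∧ n - 1 < (e : Int) <;>
      simp only [List.filter_cons, List.filter_nil, h0, h1, decide_false, if_false,
        List.nil_append, List.append_nil] <;> simp
  rw [hf]
  by_cases h0 : (p : Int) ≤ 0 ∧ (0 : Int) < (e : Int) <;>
  by_cases h1 : (p : Int) ≤ n - 1 ∧ n - 1 < (e : Int) <;>
  by_cases hn : n - 1 = 0 <;>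
  simp only [h0, h1, hn, if_true, if_false, not_true, not_false_iff, true_and, false_and,
      List.nil_append, List.append_nil] <;>
  simp [PySem.Set.ofList, PySem.Set.add, PySem.Set.contains, hn]

theorem pvBLoop_eq (gene : List Int) (s : Int) (hs : 0 ≤ s) :
    ∀ (k p : Nat) (best : Int), gene.length - p ≤ k → 0 ≤ best →
    pvBLoop gene s p best = max best (pvRefOut s (gene.length : Int) p (gene.drop p)) := by
  intro k
  induction k with
  | zero =>
    intro p best hk hb
    have hp : ¬p < gene.length := by omega
    unfold pvBLoop
    rw [dif_neg hp, List.drop_eq_nil_of_le (by omega)]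
    simp [pvRefOut]
    omega
  | succ k ih =>
    intro p best hk hb
    by_cases hp : p < gene.length
    · unfold pvBLoop
      rw [dif_pos hp]
      have hcons := List.drop_eq_getElem_cons hp
      have hgd : gene.getD p 0 = gene[p] := List.getD_eq_getElem gene 0 hp
      by_cases h1 : gene.getD p 0 ≠ 1
      · rw [if_pos h1, ih (p + 1) best (by omega) hb, hcons]
        have hx : gene[p] ≠ 1 := by omega
        simp only [pvRefOut, if_neg hx]
      · rw [if_neg h1]
        push Not at h1
        have hx1 : gene[p] = 1 := by omega
        -- the segment
        set e := pvSegEnd gene p with hedef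
        have hseg1 : e = pvSegEnd gene (p + 1) := by
          rw [hedef]; conv_lhs => unfold pvSegEnd
          rw [dif_pos hp, if_pos (by omega)]
        have hge : p + 1 ≤ e := by rw [hseg1]; exact pvSegEnd_ge gene (p + 1)
        have hle : e ≤ gene.length := pvSegEnd_le gene p (by omega)
        have hnzr : ∀ j, p + 1 ≤ j → j < e → gene.getD j 0 ≠ 0 := by
          intro j hj hj'
          rw [hseg1] at hj'
          exact pvSegEnd_nonzero gene (p + 1) j hj hj'
        have hend : e = gene.length ∨ gene.getD e 0 = 0 := pvSegEnd_end gene p (by omega)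
        -- reference side
        have hrun := pvRefIn_run s (gene.length : Int) gene e hle hend (p + 1)
          (1 + pvBonusAt s (gene.length : Int) p) hge hnzr
        -- score = pvAddRun p e 0
        have haddshift : pvAddRun s (gene.length : Int) p e 0
            = pvAddRun s (gene.length : Int) (p + 1) e (1 + pvBonusAt s (gene.length : Int) p) := by
          conv_lhs => unfold pvAddRun
          rw [if_pos (by omega)]
          congr 1
        have hscore : ((e : Int) - (p : Int)) + s *
            ((PySem.Set.ofList (([0, (gene.length : Int) - 1] : List Int).filter
              (fun q => decide ((p : Int) ≤ q ∧ q < (e : Int))))).length : Int)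
            = pvAddRun s (gene.length : Int) p e 0 := by
          rw [pvEndsCovered (gene.length : Int) p e,
            pvAddRun_eq s (gene.length : Int) e p 0 (by omega)]
          ring
        have hscore_nonneg : 0 ≤ pvAddRun s (gene.length : Int) p e 0 := by
          rw [pvAddRun_eq s (gene.length : Int) e p 0 (by omega)]
          have : (p : Int) ≤ (e : Int) := by exact_mod_cast Nat.cast_le.mpr (by omega)
          split_ifs <;> omega
        rw [hcons]
        simp only [pvRefOut, if_pos hx1]
        rw [hrun, ih (e + 1) _ (by omega) (le_max_of_le_left hb), hscore]
        rcases Nat.eq_or_lt_of_le hle with heq | hlt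
        · rw [if_pos heq, haddshift]
          have : gene.length ≤ e + 1 := by omega
          rw [List.drop_eq_nil_of_le this]
          simp only [pvRefOut]
          rw [← haddshift]
          omega
        · rw [if_neg (by omega), haddshift]
          rw [← haddshift]
          have h1' := le_max_left (pvAddRun s (gene.length : Int) p e 0)
            (pvRefOut s (gene.length : Int) (e + 1) (gene.drop (e + 1)))
          omega
    · unfold pvBLoop
      rw [dif_neg hp, List.drop_eq_nil_of_le (by omega)]
      simp [pvRefOut]
      omega

theorem pvMain (gene read : List Int) : read_is_valid gene read = read_is_valid_alt gene read := by
  simp only [read_is_valid, read_is_valid_alt]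
  have hs : 0 ≤ pvFloatScale 6305039478318694 read.length := by
    simp only [pvFloatScale]; split_ifs <;> first | exact le_refl 0 | exact Int.natCast_nonneg _
  have hA := pvFoldA (pvFloatScale 6305039478318694 read.length) (gene.length : Int) hs gene
    0 0 0 false (le_refl 0) (fun _ => rfl) (fun h => by simp at h)
  have hB := pvBLoop_eq gene (pvFloatScale 6305039478318694 read.length) hs gene.length 0 0
    (by omega) (le_refl 0)
  simp only [Nat.cast_zero] at hA
  simp only [List.drop_zero] at hB
  rw [hA, hB]
  simp only [Bool.false_eq_true, if_false]

-- ===== VERDICT (by name: the statement is the Claim_ definition above) =====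
theorem read_is_valid_spec : Claim_equal_read_is_valid := by
  intro gene read _
  unfold Spec_read_is_valid
  exact pvMain gene read
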